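-- pv_equiv track=rewrite | github.com/TrinityCore/TrinityCore | contrib/enumutils_describe.py | strescape
-- ===== SOURCE A (Python) =====
-- def strescape(str):
--     res = ''
--     for char in str:
--         if char in ('\\', '"') or not (32 <= ord(char) < 127):
--             res += ('\\%03o' % ord(char))
--         else:
--             res += char
--     return '"' + res + '"'
-- ===== SOURCE B (Python) =====
-- def strescape(str):
--     table = {ord(c): '\\%03o' % ord(c) for c in set(str)
--              if c in ('\\', '"') or not (32 <= ord(c) < 127)}
--     return '"' + str.translate(table) + '"'
-- ===== Notes on version B (the rewrite author's own statement) =====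
-- stated objective: faster
-- what changed: B precomputes a translation table over the distinct characters of the input (dict comprehension over set(str)) and produces the body in one str.translate pass, instead of A's per-character branching loop with repeated string concatenation.
import Mathlib
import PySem

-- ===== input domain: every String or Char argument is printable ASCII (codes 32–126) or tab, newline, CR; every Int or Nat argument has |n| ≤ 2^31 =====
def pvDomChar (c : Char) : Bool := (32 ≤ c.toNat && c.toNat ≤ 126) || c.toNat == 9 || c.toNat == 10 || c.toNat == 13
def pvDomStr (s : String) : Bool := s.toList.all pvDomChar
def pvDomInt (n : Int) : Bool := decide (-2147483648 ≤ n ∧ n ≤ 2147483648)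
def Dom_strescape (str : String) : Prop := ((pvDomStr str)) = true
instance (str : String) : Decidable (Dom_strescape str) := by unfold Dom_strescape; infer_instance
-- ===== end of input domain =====

-- B precomputes an escape table over the distinct characters and emits the body in one translate pass; A branches per character.
-- Both Pythons format with '\%03o' % ord(char); exact for code points < 512 (all of Dom), where %03o is exactly 3 zero-padded octal digits.
def escOct (c : Char) : List Char :=
  let n := c.toNat
  ['\\', Char.ofNat (48 + n / 64), Char.ofNat (48 + n / 8 % 8), Char.ofNat (48 + n % 8)]

-- ===== PORT A =====
def strescape (str : String) : String :=
  let res := str.toList.foldl (fun res char =>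
    if char == '\\' || char == '"' || !(decide (32 ≤ char.toNat) && decide (char.toNat < 127))
    then res ++ escOct char
    else res ++ [char]) []
  String.ofList ('"' :: res ++ ['"'])

-- ===== PORT B =====
-- table = {ord(c): '\%03o' % ord(c) for c in set(str) if …}; body = str.translate(table)
def strescape_alt (str : String) : String :=
  let table : PySem.Dict Nat (List Char) :=
    ((PySem.Set.ofList str.toList).filter (fun c =>
        c == '\\' || c == '"' || !(decide (32 ≤ c.toNat) && decide (c.toNat < 127)))).foldl
      (fun d c => d.insert c.toNat (escOct c)) PySem.Dict.empty
  String.ofList ('"' :: str.toList.flatMap (fun c => table.getD c.toNat [c]) ++ ['"'])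

-- ===== PRECONDITION & SPEC =====
def Spec_strescape (str : String) (out : String) : Prop := out = strescape_alt str
instance (str : String) (out : String) : Decidable (Spec_strescape str out) := by unfold Spec_strescape; infer_instance

-- ===== CLAIM (what is proved, stated in full; the proofs are below) =====
def Claim_equal_strescape : Prop := ∀ (str : String), Dom_strescape str → Spec_strescape str (strescape str)

-- ===== LEMMAS AND PROOFS =====

theorem char_eq_of_toNat_eq {a c : Char} (h : a.toNat = c.toNat) : a = c :=
  Char.ext (UInt32.toNat_inj.mp h)

theorem getD_escTable (l : List Char) (d : PySem.Dict Nat (List Char)) (c : Char) :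
    (l.foldl (fun d a => d.insert a.toNat (escOct a)) d).getD c.toNat [c]
      = if c ∈ l then escOct c else d.getD c.toNat [c] := by
  induction l generalizing d with
  | nil => simp
  | cons a l ih =>
    simp only [List.foldl_cons, ih]
    by_cases hm : c ∈ l
    · simp [hm]
    · by_cases hac : c.toNat = a.toNat
      · have : c = a := char_eq_of_toNat_eq hac
        simp [this, PySem.Dict.getD_insert_self]
      · have hne : c ≠ a := fun h => hac (by rw [h])
        simp [hm, hne, PySem.Dict.getD_insert, hac]

-- ===== VERDICT (by name: the statement is the Claim_ definition above) =====
theorem strescape_spec : Claim_equal_strescape := by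
  intro str _
  unfold Spec_strescape strescape strescape_alt
  dsimp only
  congr 2
  -- A's loop as a flatMap
  have hfun : (fun (res : List Char) (char : Char) =>
      if char == '\\' || char == '"' || !(decide (32 ≤ char.toNat) && decide (char.toNat < 127))
      then res ++ escOct char
      else res ++ [char])
      = (fun res char => res ++ (if char == '\\' || char == '"' || !(decide (32 ≤ char.toNat) && decide (char.toNat < 127))
          then escOct char else [char])) := by
    funext r c; split <;> rfl
  rw [hfun, PySem.List.foldl_append_eq_flatMap, List.nil_append]
  simp only [List.flatMap]
  congr 1
  congr 1
  apply List.map_congr_left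
  intro c hc
  rw [getD_escTable]
  simp [List.mem_filter, PySem.Set.mem_ofList, hc, PySem.Dict.getD_empty]
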